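-- pv_equiv track=rewrite | github.com/ajitmotra/advanced_lane_lines_finding | advanced_lane_finding.py | add_av
-- ===== SOURCE A (Python) =====
-- def non_zero_neigh_l(i, l_pix):
--     list = []
--     if (i < len(l_pix)/2):
--         list = range(i, len(l_pix))
--     else:
--         list = range(i, 0, -1)
--
--     l = []
--     a = []
--     for l in list:
--         if(l_pix[l] !=0):
--             a = l_pix[l]
--             break;
--     return a
--
-- def non_zero_neigh_r(i, r_pix, val):
--     list = []
--     if (i < len(r_pix)/2):
--         list = range(i, len(r_pix))
--     else:
--         list = range(i, 0, -1)
--     l = []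
--     a = []
--     for l in list:
--         if(r_pix[l] != val):
--             a = r_pix[l]
--             break;
--     return a
--
-- def add_av(left_pix, right_pix, val):
--     for i in range(0, len(left_pix)):
--         if(left_pix[i] == 0):
--             left_pix[i] = non_zero_neigh_l(i, left_pix)
--
--     for i in range(0, len(right_pix)):
--         if(right_pix[i] == val):
--             right_pix[i] = non_zero_neigh_r(i, right_pix, val)
--
--     return left_pix, right_pix
-- ===== SOURCE B (Python) =====
-- # B: alternative gap filling. One backward pass precomputes, for each index, the
-- # first non-gap value at or after it; one forward pass then fills each gap cell with
-- # that table entry (front half) or with the running previous output value (back half).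
-- # Like A, mutates both lists in place and returns them.
-- def _fill(pix, gap):
--     n = len(pix)
--     nxt = [None] * n
--     last = None
--     for j in range(n - 1, -1, -1):
--         if pix[j] != gap:
--             last = pix[j]
--         nxt[j] = last
--     prev = None
--     for i in range(n):
--         if pix[i] == gap:
--             pix[i] = nxt[i] if 2 * i < n else prev
--         prev = pix[i]
--
-- def add_av(left_pix, right_pix, val):
--     _fill(left_pix, 0)
--     _fill(right_pix, val)
--     return left_pix, right_pix
-- ===== Notes on version B (the rewrite author's own statement) =====
-- stated objective: alternative
-- what changed: A rescans the list directionally from every gap cell; B instead makes one backward pass precomputing the next-non-gap value per index and one forward pass carrying the running previous value, filling all gaps in two sweeps.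
-- outside the precondition, e.g. on add_av([0, 0, 0], [1], 5): A returns ([[], [], []], [1]), B returns ([None, None, None], [1]); on add_av([5, 0], [1], 7): A returns ([5, []], [1]), B returns ([5, 5], [1])
import Mathlib
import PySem

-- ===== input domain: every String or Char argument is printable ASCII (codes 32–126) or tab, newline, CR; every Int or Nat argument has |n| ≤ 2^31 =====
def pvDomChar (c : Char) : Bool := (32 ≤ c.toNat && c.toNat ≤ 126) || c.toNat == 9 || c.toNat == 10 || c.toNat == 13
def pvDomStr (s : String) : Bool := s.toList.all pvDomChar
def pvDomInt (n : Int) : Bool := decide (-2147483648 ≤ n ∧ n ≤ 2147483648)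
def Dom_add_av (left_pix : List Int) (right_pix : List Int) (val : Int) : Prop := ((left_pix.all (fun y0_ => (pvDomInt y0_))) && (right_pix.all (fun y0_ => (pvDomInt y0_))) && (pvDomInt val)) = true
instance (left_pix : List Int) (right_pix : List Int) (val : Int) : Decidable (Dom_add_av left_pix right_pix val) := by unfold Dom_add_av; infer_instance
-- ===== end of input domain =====

-- B replaces A's per-gap directional rescans by one backward pass (next non-gap table)
-- plus one forward pass (running previous value); equivalence is about the RETURN value —
-- both Pythons also mutate the argument lists in place, to the same final contents.

-- ===== PORT A =====
-- scan loop shared by Python's non_zero_neigh_l (gap = 0) and non_zero_neigh_r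
-- (gap = val); the two Python helpers are identical up to that compared constant.
def neighScan (pix : List Int) (gap : Int) : List Int → Option Int
  | [] => none
  | j :: rest =>
    match PySem.List.pyGet? pix j with
    | none => none
    | some v => if v ≠ gap then some v else neighScan pix gap rest

-- non_zero_neigh_l i pix = non_zero_neigh i pix 0; non_zero_neigh_r i pix val = non_zero_neigh i pix val.
-- 'none' is Python's fall-through return of the empty list [] (no neighbour found) — excluded by Pre_.
def non_zero_neigh (i : Int) (pix : List Int) (gap : Int) : Option Int :=
  let idxs := if 2 * i < (pix.length : Int)
    then PySem.List.pyRange i (pix.length : Int) 1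
    else PySem.List.pyRange i 0 (-1)
  neighScan pix gap idxs

-- the 'for i in range(0, len(...))' in-place mutation loop of A, generic in the gap value
def aFillGo (gap : Int) (acc : List Int) (k : Nat) : List Int :=
  if h : k < acc.length then
    aFillGo gap
      (if acc[k] = gap then acc.set k ((non_zero_neigh (k : Int) acc gap).getD 0) else acc)
      (k + 1)
  else acc
termination_by acc.length - k
decreasing_by
  split
  · simp only [List.length_set]
    omega
  · omega

def add_av (left_pix : List Int) (right_pix : List Int) (val : Int) : List Int × List Int :=
  (aFillGo 0 left_pix 0, aFillGo val right_pix 0)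

-- ===== PORT B =====
-- backward pass of Source B: running last non-gap value plus the per-index table nxt
def buildNxt (gap : Int) : List Int → Option Int × List (Option Int)
  | [] => (none, [])
  | x :: xs =>
    let p := buildNxt gap xs
    let last := if x ≠ gap then some x else p.1
    (last, last :: p.2)

-- forward pass of Source B over the pixels zipped with the table, carrying the previous output value
def fwdFill (gap : Int) (n : Int) : List (Int × Option Int) → Option Int → Int → List Int
  | [], _, _ => []
  | (x, nx) :: rest, prev, i =>
    let y := if x = gap then (if 2 * i < n then nx.getD 0 else prev.getD 0) else x
    y :: fwdFill gap n rest (some y) (i + 1)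

def fillAlt (pix : List Int) (gap : Int) : List Int :=
  fwdFill gap (pix.length : Int) (pix.zip (buildNxt gap pix).2) none 0

def add_av_alt (left_pix : List Int) (right_pix : List Int) (val : Int) : List Int × List Int :=
  (fillAlt left_pix 0, fillAlt right_pix val)

-- ===== PRECONDITION & SPEC =====
-- Pre_ excludes exactly the inputs on which A's neighbour search falls through and A
-- stores the Python empty list [] into the result (not an int): a front-half gap cell
-- whose whole suffix is gaps, or a gap in cell 1 of a length-2 list (A's backward scan
-- stops before index 0).
def PreFill (pix : List Int) (gap : Int) : Prop :=
  (∀ i < pix.length, 2 * i < pix.length → pix.getD i 0 = gap →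
      ∃ j < pix.length, i ≤ j ∧ pix.getD j 0 ≠ gap) ∧
  (pix.length = 2 → pix.getD 1 0 ≠ gap)

def Pre_add_av (left_pix : List Int) (right_pix : List Int) (val : Int) : Prop :=
  PreFill left_pix 0 ∧ PreFill right_pix val

instance (left_pix : List Int) (right_pix : List Int) (val : Int) : Decidable (Pre_add_av left_pix right_pix val) := by
  unfold Pre_add_av PreFill; exact instDecidableAnd

def pvWitness_add_av : List Int × List Int × Int := ([1, 0, 2], [3, 0], 7)

def Spec_add_av (left_pix : List Int) (right_pix : List Int) (val : Int) (out : List Int × List Int) : Prop := out = add_av_alt left_pix right_pix val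
instance (left_pix : List Int) (right_pix : List Int) (val : Int) (out : List Int × List Int) : Decidable (Spec_add_av left_pix right_pix val out) := by unfold Spec_add_av; infer_instance

-- ===== CLAIM (what is proved, stated in full; the proofs are below) =====
def Claim_equal_add_av : Prop := ∀ (left_pix : List Int) (right_pix : List Int) (val : Int), Dom_add_av left_pix right_pix val → Pre_add_av left_pix right_pix val → Spec_add_av left_pix right_pix val (add_av left_pix right_pix val)

-- ===== LEMMAS AND PROOFS =====

-- first element ≠ gap of a list (value of A's forward scan, and of B's table entries)
def firstNG (gap : Int) : List Int → Option Int
  | [] => none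
  | x :: xs => if x ≠ gap then some x else firstNG gap xs

-- spec of buildNxt's second component
def nxts (gap : Int) : List Int → List (Option Int)
  | [] => []
  | x :: xs => firstNG gap (x :: xs) :: nxts gap xs

theorem buildNxt_eq (gap : Int) (pix : List Int) :
    buildNxt gap pix = (firstNG gap pix, nxts gap pix) := by
  induction pix with
  | nil => rfl
  | cons x xs ih => simp [buildNxt, firstNG, nxts, ih]

theorem firstNG_some_of_ex (gap : Int) (s : List Int) (h : ∃ y ∈ s, y ≠ gap) :
    ∃ v, firstNG gap s = some v ∧ v ≠ gap := by
  induction s with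
  | nil => simp at h
  | cons x xs ih =>
    by_cases hx : x = gap
    · rw [firstNG, if_neg (by simpa using hx)]
      rcases h with ⟨y, hy, hne⟩
      simp only [List.mem_cons] at hy
      rcases hy with rfl | hy
      · exact absurd hx hne
      · exact ih ⟨y, hy, hne⟩
    · exact ⟨x, by simp [firstNG, hx], hx⟩

theorem neighScan_forward (gap : Int) :
    ∀ (s done : List Int),
      neighScan (done ++ s) gap
        (PySem.List.pyRange (done.length : Int) ((done.length + s.length : Nat) : Int) 1)
      = firstNG gap s := by
  intro s
  induction s with
  | nil =>
    intro done
    rw [PySem.List.pyRange_one_eq_nil (by simp)]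
    rfl
  | cons x xs ih =>
    intro done
    rw [PySem.List.pyRange_one_cons (by push_cast [List.length_cons]; omega)]
    have hget : PySem.List.pyGet? (done ++ x :: xs) (done.length : Int) = some x := by
      rw [PySem.List.pyGet?_natCast]
      simp
    rw [neighScan, hget]
    dsimp only
    by_cases hx : x = gap
    · rw [if_neg (not_not_intro hx), firstNG, if_neg (not_not_intro hx)]
      have hih := ih (done ++ [x])
      simp only [List.append_assoc, List.singleton_append, List.length_append,
        List.length_cons] at hih ⊢
      have harith : ((done.length : Int) + 1) = ((done.length + 1 : Nat) : Int) := by push_cast; ring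
      have harith2 : (done.length + (xs.length + 1)) = (done.length + 1 + xs.length) := by omega
      rw [harith, harith2]
      simpa using hih
    · simp [hx, firstNG]

theorem neighScan_backward (gap : Int) (done rest : List Int)
    (hne : done ≠ []) (hk : 2 ≤ done.length)
    (hd : done.getLast hne ≠ gap) :
    neighScan (done ++ gap :: rest) gap (PySem.List.pyRange (done.length : Int) 0 (-1))
      = some (done.getLast hne) := by
  rw [PySem.List.pyRange_neg_one_cons (by omega)]
  rw [neighScan]
  have h1 : PySem.List.pyGet? (done ++ gap :: rest) (done.length : Int) = some gap := by
    rw [PySem.List.pyGet?_natCast]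
    simp
  rw [h1]
  dsimp only
  rw [if_neg (not_not_intro rfl)]
  rw [PySem.List.pyRange_neg_one_cons (by omega)]
  rw [neighScan]
  have hcast : ((done.length : Int) - 1) = ((done.length - 1 : Nat) : Int) := by omega
  have h2 : PySem.List.pyGet? (done ++ gap :: rest) ((done.length : Int) - 1)
      = some (done.getLast hne) := by
    rw [hcast, PySem.List.pyGet?_natCast]
    have hlt : done.length - 1 < done.length := by omega
    rw [List.getElem?_append_left hlt, List.getElem?_eq_getElem hlt]
    congr 1
    exact (List.getLast_eq_getElem hne).symm
  rw [h2]
  dsimp only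
  simp [hd]

theorem pix_getD_of_drop (pix : List Int) (k : Nat) (x : Int) (rest : List Int)
    (h : pix.drop k = x :: rest) : pix.getD k 0 = x := by
  have h0 : (pix.drop k)[0]? = some x := by rw [h]; rfl
  rw [List.getElem?_drop] at h0
  simp only [Nat.add_zero] at h0
  rw [List.getD_eq_getElem?_getD, h0]
  rfl

theorem aFill_eq_fwd (gap : Int) (pix : List Int) (hpre : PreFill pix gap) :
    ∀ (s done : List Int),
      done.length + s.length = pix.length →
      s = pix.drop done.length →
      (∀ y ∈ done, y ≠ gap) →
      aFillGo gap (done ++ s) done.length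
        = done ++ fwdFill gap (pix.length : Int) (s.zip (nxts gap s)) done.getLast? (done.length : Int) := by
  intro s
  induction s with
  | nil =>
    intro done hlen _ _
    unfold aFillGo
    simp [fwdFill, nxts]
  | cons x rest ih =>
    intro done hlen hdrop hng
    have hk : done.length < (done ++ x :: rest).length := by simp
    unfold aFillGo
    rw [dif_pos hk]
    have hacc : (done ++ x :: rest)[done.length]'hk = x := by
      rw [List.getElem_append_right (Nat.le_refl done.length)]
      simp
    have hrest : rest = pix.drop (done.length + 1) := by
      have h1 := congrArg List.tail hdrop
      simpa [List.tail_drop] using h1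
    have hzip : ((x :: rest).zip (nxts gap (x :: rest)))
        = (x, firstNG gap (x :: rest)) :: rest.zip (nxts gap rest) := by
      simp [nxts]
    have hsetstep : ∀ (v : Int), v ≠ gap →
        aFillGo gap (done ++ v :: rest) (done.length + 1)
          = done ++ v :: fwdFill gap (pix.length : Int) (rest.zip (nxts gap rest)) (some v) ((done.length : Int) + 1) := by
      intro v hv
      have h1 : done ++ v :: rest = (done ++ [v]) ++ rest := by simp
      have h2 : done.length + 1 = (done ++ [v]).length := by simp
      have hng' : ∀ y ∈ done ++ [v], y ≠ gap := by
        intro y hy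
        rcases List.mem_append.mp hy with hy | hy
        · exact hng y hy
        · simp at hy
          rw [hy]
          exact hv
      rw [h1, h2, ih (done ++ [v]) (by simp at hlen ⊢; omega) (by rw [← h2, ← hrest]) hng']
      have hl : (done ++ [v]).getLast? = some v := by simp
      have hn : (((done ++ [v]).length : Nat) : Int) = (done.length : Int) + 1 := by
        simp
      rw [hl, hn, List.append_assoc]
      rfl
    have hlenacc : ((done ++ x :: rest).length : Int) = (pix.length : Int) := by
      simp at hlen ⊢
      omega
    have hklt : done.length < pix.length := by
      simp at hlen
      omega
    by_cases hx : x = gap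
    · rw [if_pos (hacc.trans hx)]
      by_cases h2 : 2 * (done.length : Int) < (pix.length : Int)
      · -- forward half: A scans ahead over the untouched suffix; B reads the nxt table
        have hex : ∃ y ∈ x :: rest, y ≠ gap := by
          have hi := hpre.1 done.length hklt (by exact_mod_cast h2)
            ((pix_getD_of_drop pix done.length x rest hdrop.symm).trans hx)
          rcases hi with ⟨j, hj, hij, hne⟩
          refine ⟨pix.getD j 0, ?_, hne⟩
          have hjk : j - done.length < (x :: rest).length := by
            have hlendrop := List.length_drop (l := pix) (i := done.length)
            rw [hdrop.symm] at hlendrop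
            simp at hlendrop
            omega
          have hget : (x :: rest)[j - done.length]? = pix[j]? := by
            rw [← hdrop.symm, List.getElem?_drop]
            congr 1
            omega
          have hsome := List.getElem?_eq_getElem hjk
          rw [hget] at hsome
          rw [List.getD_eq_getElem?_getD, hsome]
          exact List.getElem_mem _
        rcases firstNG_some_of_ex gap (x :: rest) hex with ⟨v, hfv, hvg⟩
        have hscan : non_zero_neigh (done.length : Int) (done ++ x :: rest) gap = some v := by
          simp only [non_zero_neigh]
          rw [hlenacc, if_pos h2]
          have hb : (pix.length : Int) = ((done.length + (x :: rest).length : Nat) : Int) := by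
            simp at hlen ⊢
            omega
          rw [hb, neighScan_forward, hfv]
        rw [hscan]
        have hset : (done ++ x :: rest).set done.length v = done ++ v :: rest := by
          rw [List.set_append]
          simp
        simp only [Option.getD_some, hset]
        rw [hsetstep v hvg, hzip, fwdFill]
        rw [hx] at hfv
        simp [hx, hfv, h2]
      · -- backward half: A rescans downwards and finds cell k-1; B uses the running prev
        have hk2 : 2 ≤ done.length := by
          rcases Nat.lt_or_ge done.length 2 with hlt | hge
          · exfalso
            have h01 : done.length = 0 ∨ done.length = 1 := by omega
            rcases h01 with h0 | h1
            · exact h2 (by omega)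
            · have hn2 : pix.length = 2 := by omega
              exact hpre.2 hn2
                ((pix_getD_of_drop pix 1 x rest (by rw [← h1]; exact hdrop.symm)).trans hx)
          · exact hge
        have hdne : done ≠ [] := by
          intro hd0
          rw [hd0] at hk2
          simp at hk2
        have hdg : done.getLast hdne ≠ gap := hng _ (List.getLast_mem hdne)
        have hscan : non_zero_neigh (done.length : Int) (done ++ x :: rest) gap
            = some (done.getLast hdne) := by
          simp only [non_zero_neigh]
          rw [hlenacc, if_neg h2, hx]
          exact neighScan_backward gap done rest hdne hk2 hdg
        rw [hscan]
        have hset : (done ++ x :: rest).set done.length (done.getLast hdne)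
            = done ++ (done.getLast hdne) :: rest := by
          rw [List.set_append]
          simp
        simp only [Option.getD_some, hset]
        rw [hsetstep _ hdg, hzip, fwdFill]
        have hlast : done.getLast? = some (done.getLast hdne) := List.getLast?_eq_some_getLast hdne
        simp [hx, if_neg h2, hlast]
    · rw [if_neg (by rw [hacc]; exact hx)]
      rw [hsetstep x hx, hzip, fwdFill]
      simp [hx]

theorem fill_eq (pix : List Int) (gap : Int) (h : PreFill pix gap) :
    aFillGo gap pix 0 = fillAlt pix gap := by
  have := aFill_eq_fwd gap pix h pix [] (by simp) (by simp) (by simp)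
  simpa [fillAlt, buildNxt_eq] using this

-- ===== VERDICT (by name: the statement is the Claim_ definition above) =====
theorem add_av_spec : Claim_equal_add_av := by
  intro left_pix right_pix val _ hpre
  unfold Spec_add_av add_av add_av_alt
  rw [fill_eq left_pix 0 hpre.1, fill_eq right_pix val hpre.2]
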